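-- pv_equiv track=rewrite | github.com/pypi-data/pypi-mirror-329 | packages/xtlib/xtlib-0.0.337-py3-none-any.whl/xtlib/cmd_utils.py | text_needs_quotes
-- ===== SOURCE A (Python) =====
-- def text_needs_quotes(text):
--     needed = False
--     if text:
--         has_quotes = text[0] in "'`\""
--         if not has_quotes:
--             for ch in " <>!=:":
--                 if ch in text:
--                     needed = True
--                     break
--
--     return needed
-- ===== SOURCE B (Python) =====
-- SPECIAL = set(" <>!=:")
-- QUOTES = set("'`\"")
--
-- def text_needs_quotes(text):
--     if not text:
--         return False
--     if text[0] in QUOTES: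
--         return False
--     return any(c in SPECIAL for c in text)
-- ===== Notes on version B (the rewrite author's own statement) =====
-- stated objective: idiomatic
-- what changed: B scans the text once checking each character against a precomputed special-character set, instead of A's six substring searches through the text (one per special character), and returns early with guard clauses instead of a mutated flag.
import Mathlib
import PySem

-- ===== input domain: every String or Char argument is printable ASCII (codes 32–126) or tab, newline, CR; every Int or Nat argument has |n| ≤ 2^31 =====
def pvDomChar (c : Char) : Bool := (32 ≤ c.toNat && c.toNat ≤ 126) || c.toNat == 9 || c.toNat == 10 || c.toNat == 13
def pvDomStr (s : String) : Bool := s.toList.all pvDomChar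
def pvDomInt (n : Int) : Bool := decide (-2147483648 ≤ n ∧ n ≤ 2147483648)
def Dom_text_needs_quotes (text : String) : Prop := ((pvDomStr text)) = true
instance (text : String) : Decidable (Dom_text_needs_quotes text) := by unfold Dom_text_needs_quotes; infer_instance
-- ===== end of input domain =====

-- B scans the text once against precomputed character sets instead of A's six substring searches through the text; same return value.
-- ===== PORT A =====
-- A's for-loop over " <>!=:" with break, as structural recursion over that list
def pvLoopA : List Char → String → Bool
  | [], _ => false
  | ch :: rest, text =>
    if PySem.Str.isIn (String.ofList [ch]) text then true else pvLoopA rest text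

def text_needs_quotes (text : String) : Bool :=
  let needed := false
  if text ≠ "" then
    let has_quotes := PySem.Str.isIn
      (String.ofList (match PySem.Str.pyGet? text 0 with | some c => [c] | none => [])) "'`\""
    if !has_quotes then pvLoopA " <>!=:".toList text else needed
  else needed

-- ===== PORT B =====
def pvSPECIAL : PySem.Set Char := PySem.Set.ofList " <>!=:".toList
def pvQUOTES : PySem.Set Char := PySem.Set.ofList "'`\"".toList

def text_needs_quotes_alt (text : String) : Bool :=
  match text.toList with
  | [] => false
  | c :: _ =>
    if PySem.Set.contains pvQUOTES c then false
    else text.toList.any (fun ch => PySem.Set.contains pvSPECIAL ch)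

-- ===== PRECONDITION & SPEC =====
def Spec_text_needs_quotes (text : String) (out : Bool) : Prop := out = text_needs_quotes_alt text
instance (text : String) (out : Bool) : Decidable (Spec_text_needs_quotes text out) := by unfold Spec_text_needs_quotes; infer_instance

-- ===== CLAIM (what is proved, stated in full; the proofs are below) =====
def Claim_equal_text_needs_quotes : Prop := ∀ (text : String), Dom_text_needs_quotes text → Spec_text_needs_quotes text (text_needs_quotes text)

-- ===== LEMMAS AND PROOFS =====
-- single-character substring containment is character membership
theorem pv_isIn_single (c : Char) (s : String) :
    PySem.Str.isIn (String.ofList [c]) s = s.toList.contains c := by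
  simp only [PySem.Str.isIn_eq, List.contains_eq_mem]
  rw [Bool.eq_iff_iff, PySem.Chars.isIn_iff_infix]
  simp [List.singleton_infix_iff]

theorem pvLoopA_eq_any (cs : List Char) (text : String) :
    pvLoopA cs text = cs.any (fun ch => text.toList.contains ch) := by
  induction cs with
  | nil => rfl
  | cons ch rest ih =>
    rw [pvLoopA, pv_isIn_single, ih, List.any_cons]
    by_cases hc : text.toList.contains ch = true <;> simp

-- the two iteration orders (special chars outer vs text chars outer) agree
theorem pv_any_contains_comm (l m : List Char) :
    (l.any fun ch => m.contains ch) = (m.any fun ch => l.contains ch) := by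
  rw [Bool.eq_iff_iff]
  simp only [List.any_eq_true, List.contains_eq_mem, decide_eq_true_eq]
  tauto

theorem pv_set_contains_literal (l : List Char) (c : Char) :
    PySem.Set.contains (PySem.Set.ofList l) c = l.contains c := by
  rw [Bool.eq_iff_iff]
  simp [PySem.Set.mem_ofList]

theorem text_needs_quotes_spec : Claim_equal_text_needs_quotes := by
  intro text _
  unfold Spec_text_needs_quotes text_needs_quotes text_needs_quotes_alt
  cases h : text.toList with
  | nil =>
    have : text = "" := by
      have := congrArg String.ofList h
      simpa using this
    simp [this]
  | cons c rest =>
    have hne : text ≠ "" := by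
      intro he; rw [he] at h; simp at h
    have hget : PySem.Str.pyGet? text 0 = some c := by
      simp [PySem.Str.pyGet?_eq, h, PySem.List.pyGet?, PySem.List.pyIdx?]
    simp only [hne, if_pos, ne_eq, not_false_eq_true, hget]
    rw [pv_isIn_single, pvLoopA_eq_any]
    rw [show pvQUOTES.contains c = ("'`\"".toList).contains c from pv_set_contains_literal _ c, h]
    cases hq : ("'`\"".toList).contains c with
    | true => simp only [Bool.not_true, Bool.false_eq_true, if_false, if_true]
    | false =>
      simp only [Bool.not_false, if_true, Bool.false_eq_true, if_false]
      rw [pv_any_contains_comm, ← h]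
      simp only [pvSPECIAL, pv_set_contains_literal]
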